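-- pv_equiv track=rewrite | github.com/SoulXHades/Renaming-Script | CLI version/renamingScript.py | additionOfZeros
-- ===== SOURCE A (Python) =====
-- def additionOfZeros(currentFileNum, totalNumOfFiles):
-- 	#default is empty incase don't require adding of 0s
-- 	zeros = ""
-- 	sizeOfCurrentFileNum = sizeOfTotalFilesNum = 10
--
-- 	#to get the number of digits in the number that is going to be assigned to the current filename
-- 	currentFileNum //= 10
--
-- 	while currentFileNum != 0:
-- 		currentFileNum //= 10
-- 		sizeOfCurrentFileNum *= 10
--
-- 	#to get the number of digits in the number that is going to be assigned to the final filename (max number of digits setting as standard)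
-- 	totalNumOfFiles //= 10
-- 	while totalNumOfFiles != 0:
-- 		totalNumOfFiles //= 10
-- 		sizeOfTotalFilesNum *= 10
--
--
-- 	#to obtain the number of digits off
-- 	zeros = str(sizeOfTotalFilesNum // sizeOfCurrentFileNum)
--
-- 	#remove the '1' from 10 or 100, etc
-- 	return zeros.strip("1")
-- ===== SOURCE B (Python) =====
-- def additionOfZeros(currentFileNum, totalNumOfFiles):
--     # build the padding directly: one '0' per missing digit (empty if none are missing)
--     return "0" * (len(str(totalNumOfFiles)) - len(str(currentFileNum)))
-- ===== Notes on version B (the rewrite author's own statement) =====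
-- stated objective: simpler
-- what changed: A counts digits with two repeated-division loops, forms the power quotient 10^dt//10^dc and strips '1' characters from its decimal string; B never computes any power or quotient at all and instead builds the padding string directly as '0' repeated (len(str(total)) - len(str(current))) times.
-- intended difference: When currentFileNum has more digits than totalNumOfFiles, A returns the stray string '0' (the stripped decimal of the zero quotient) while B returns '' (no padding), which is the intended value since no zero-padding is needed there. — e.g. on additionOfZeros(100, 5): A returns "0", B returns ""
import Mathlib
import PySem

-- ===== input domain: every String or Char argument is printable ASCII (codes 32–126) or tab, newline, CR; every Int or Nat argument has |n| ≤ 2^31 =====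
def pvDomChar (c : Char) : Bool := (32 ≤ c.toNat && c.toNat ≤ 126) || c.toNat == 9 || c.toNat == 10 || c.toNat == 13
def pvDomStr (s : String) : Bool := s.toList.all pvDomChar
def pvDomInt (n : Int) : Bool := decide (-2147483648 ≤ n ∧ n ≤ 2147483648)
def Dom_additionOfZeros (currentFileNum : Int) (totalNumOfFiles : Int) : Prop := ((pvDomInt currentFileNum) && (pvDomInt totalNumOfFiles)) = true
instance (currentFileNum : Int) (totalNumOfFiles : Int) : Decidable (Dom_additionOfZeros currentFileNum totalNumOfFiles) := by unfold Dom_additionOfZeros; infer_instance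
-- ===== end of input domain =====

-- B builds the padding string directly as '0' repeated (len(str(total)) - len(str(current))) times,
-- with no power, quotient or strip; objective: simpler (no speed claim).

-- ===== PORT A =====
-- A's while loop 'while c != 0: c //= 10; size *= 10', made total with fuel
-- (fuel natAbs c + 1 is more than enough iterations for c ≥ 0; A diverges for c < 0, excluded by Pre_).
def pvSizeLoop (fuel : Nat) (c : Int) (s : Int) : Int :=
  match fuel with
  | 0 => s
  | f + 1 => if c ≠ 0 then pvSizeLoop f (PySem.Int.floordiv c 10) (s * 10) else s

def additionOfZeros (currentFileNum : Int) (totalNumOfFiles : Int) : String :=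
  -- currentFileNum //= 10; loop
  let c0 := PySem.Int.floordiv currentFileNum 10
  let sizeOfCurrentFileNum := pvSizeLoop (c0.natAbs + 1) c0 10
  -- totalNumOfFiles //= 10; loop
  let t0 := PySem.Int.floordiv totalNumOfFiles 10
  let sizeOfTotalFilesNum := pvSizeLoop (t0.natAbs + 1) t0 10
  let zeros := PySem.Int.toStr (PySem.Int.floordiv sizeOfTotalFilesNum sizeOfCurrentFileNum)
  PySem.Str.stripChars zeros "1"

-- ===== PORT B =====
def additionOfZeros_alt (currentFileNum : Int) (totalNumOfFiles : Int) : String :=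
  -- "0" * (len(str(totalNumOfFiles)) - len(str(currentFileNum)))
  String.ofList (PySem.List.pyRepeat ['0']
    (PySem.Str.len (PySem.Int.toStr totalNumOfFiles) - PySem.Str.len (PySem.Int.toStr currentFileNum)))

-- ===== PRECONDITION & SPEC =====
-- Pre_ excludes negative arguments: there A's while loops never terminate (n //= 10 stalls at -1), so A returns on exactly these inputs.
def Pre_additionOfZeros (currentFileNum : Int) (totalNumOfFiles : Int) : Prop :=
  0 ≤ currentFileNum ∧ 0 ≤ totalNumOfFiles
instance (currentFileNum : Int) (totalNumOfFiles : Int) : Decidable (Pre_additionOfZeros currentFileNum totalNumOfFiles) := by unfold Pre_additionOfZeros; infer_instance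
def pvWitness_additionOfZeros : Int × Int := (3, 2500)

-- When currentFileNum has more digits than totalNumOfFiles, A returns the stray string "0"
-- (the stripped decimal of the zero quotient) while B returns "" (no padding), which is the
-- intended value since no zero-padding is needed there.
def D_additionOfZeros (currentFileNum : Int) (totalNumOfFiles : Int) : Prop :=
  ∃ k ∈ Finset.Icc 1 10, totalNumOfFiles < 10 ^ k ∧ 10 ^ k ≤ currentFileNum
instance (currentFileNum : Int) (totalNumOfFiles : Int) : Decidable (D_additionOfZeros currentFileNum totalNumOfFiles) := by unfold D_additionOfZeros; infer_instance

def Spec_additionOfZeros (currentFileNum : Int) (totalNumOfFiles : Int) (out : String) : Prop := ¬ D_additionOfZeros currentFileNum totalNumOfFiles → out = additionOfZeros_alt currentFileNum totalNumOfFiles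
instance (currentFileNum : Int) (totalNumOfFiles : Int) (out : String) : Decidable (Spec_additionOfZeros currentFileNum totalNumOfFiles out) := by unfold Spec_additionOfZeros; infer_instance

def pvDiffWitness_additionOfZeros : Int × Int := (100, 5)
def pvDiffWitnessOut_additionOfZeros : String × String := ("0", "")

-- ===== CLAIM (what is proved, stated in full; the proofs are below) =====
def Claim_unchanged_additionOfZeros : Prop := ∀ (currentFileNum : Int) (totalNumOfFiles : Int), Dom_additionOfZeros currentFileNum totalNumOfFiles → Pre_additionOfZeros currentFileNum totalNumOfFiles → Spec_additionOfZeros currentFileNum totalNumOfFiles (additionOfZeros currentFileNum totalNumOfFiles)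
def Claim_changed_additionOfZeros : Prop := Dom_additionOfZeros (pvDiffWitness_additionOfZeros.1) (pvDiffWitness_additionOfZeros.2) ∧ Pre_additionOfZeros (pvDiffWitness_additionOfZeros.1) (pvDiffWitness_additionOfZeros.2) ∧ D_additionOfZeros (pvDiffWitness_additionOfZeros.1) (pvDiffWitness_additionOfZeros.2) ∧ additionOfZeros (pvDiffWitness_additionOfZeros.1) (pvDiffWitness_additionOfZeros.2) = pvDiffWitnessOut_additionOfZeros.1 ∧ additionOfZeros_alt (pvDiffWitness_additionOfZeros.1) (pvDiffWitness_additionOfZeros.2) = pvDiffWitnessOut_additionOfZeros.2 ∧ pvDiffWitnessOut_additionOfZeros.1 ≠ pvDiffWitnessOut_additionOfZeros.2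
def Claim_exact_additionOfZeros : Prop := ∀ (currentFileNum : Int) (totalNumOfFiles : Int), Dom_additionOfZeros currentFileNum totalNumOfFiles → Pre_additionOfZeros currentFileNum totalNumOfFiles → D_additionOfZeros currentFileNum totalNumOfFiles → additionOfZeros currentFileNum totalNumOfFiles ≠ additionOfZeros_alt currentFileNum totalNumOfFiles

-- ===== LEMMAS AND PROOFS =====

-- length of Nat.toDigitsCore 10 with sufficient fuel
lemma pv_tdc_len : ∀ (n : Nat), ∀ (f : Nat) (l : List Char), n < f →
    (Nat.toDigitsCore 10 f n l).length = Nat.log 10 n + 1 + l.length := by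
  intro n
  induction n using Nat.strong_induction_on with
  | _ n ih =>
    intro f l hf
    match f with
    | 0 => omega
    | f' + 1 =>
      rw [Nat.toDigitsCore]
      by_cases h : n / 10 = 0
      · have hlog : Nat.log 10 n = 0 := Nat.log_eq_zero_iff.mpr (by omega)
        simp only [h, if_pos, List.length_cons, hlog]
        omega
      · simp only [h, ite_false]
        have hrec := ih (n / 10) (by omega) f' ((n % 10).digitChar :: l) (by omega)
        rw [hrec]
        have h1 := Nat.log_div_base 10 n
        have h2 : 1 ≤ Nat.log 10 n := Nat.log_pos (by omega) (by omega)
        simp only [List.length_cons]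
        omega

-- for n ≥ 0, the decimal string of n has log₁₀ n + 1 characters
lemma pv_toChars_len (n : Int) (hn : 0 ≤ n) :
    (PySem.Int.toChars n).length = Nat.log 10 n.toNat + 1 := by
  unfold PySem.Int.toChars
  rw [if_neg (by omega)]
  unfold Nat.toDigits
  simpa using pv_tdc_len n.toNat (n.toNat + 1) [] (by omega)

-- A's size loop computes 10^(number of divisions until 0), in closed form
lemma pv_sizeLoop_eq : ∀ (m : Nat), ∀ (f : Nat) (s : Int), m < f →
    pvSizeLoop f (m : Int) s = s * 10 ^ (if m = 0 then 0 else Nat.log 10 m + 1) := by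
  intro m
  induction m using Nat.strong_induction_on with
  | _ m ih =>
    intro f s hf
    match f with
    | 0 => omega
    | f' + 1 =>
      by_cases h0 : m = 0
      · simp [pvSizeLoop, h0]
      · rw [pvSizeLoop]
        rw [if_pos (by exact_mod_cast h0)]
        rw [show PySem.Int.floordiv (m : Int) 10 = ((m / 10 : Nat) : Int) from
          PySem.Int.floordiv_natCast m 10]
        rw [ih (m / 10) (by omega) f' (s * 10) (by omega)]
        rw [if_neg h0]
        by_cases h10 : m / 10 = 0
        · have hlog : Nat.log 10 m = 0 := Nat.log_eq_zero_iff.mpr (by omega)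
          rw [if_pos h10, hlog]
          ring
        · have h1 := Nat.log_div_base 10 m
          have h2 : 1 ≤ Nat.log 10 m := Nat.log_pos (by omega) (by omega)
          have hlog : Nat.log 10 m = Nat.log 10 (m / 10) + 1 := by omega
          rw [if_neg h10, hlog]
          ring

-- A's whole digit-size computation equals 10 ^ len(str n) for n ≥ 0
lemma pv_size_eq_pow_len (n : Int) (hn : 0 ≤ n) :
    pvSizeLoop ((PySem.Int.floordiv n 10).natAbs + 1) (PySem.Int.floordiv n 10) 10
      = 10 ^ (PySem.Str.len (PySem.Int.toStr n)).toNat := by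
  have hdiv : PySem.Int.floordiv n 10 = ((n.toNat / 10 : Nat) : Int) := by
    have := PySem.Int.floordiv_natCast n.toNat 10
    rwa [Int.toNat_of_nonneg hn] at this
  rw [hdiv]
  have hlen : (PySem.Str.len (PySem.Int.toStr n)).toNat = Nat.log 10 n.toNat + 1 := by
    rw [PySem.Str.len_eq, PySem.Int.toList_toStr, pv_toChars_len n hn]
    simp
  rw [hlen]
  rw [pv_sizeLoop_eq (n.toNat / 10) _ 10 (by simp; omega)]
  by_cases h : n.toNat / 10 = 0
  · have hlog : Nat.log 10 n.toNat = 0 := Nat.log_eq_zero_iff.mpr (by omega)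
    rw [if_pos h, hlog]
    ring
  · have h1 := Nat.log_div_base 10 n.toNat
    have h2 : 1 ≤ Nat.log 10 n.toNat := Nat.log_pos (by omega) (by omega)
    have hlog : Nat.log 10 n.toNat = Nat.log 10 (n.toNat / 10) + 1 := by omega
    rw [if_neg h, hlog]
    ring

-- decimal digits of 10^k: a '1' followed by k '0's
lemma pv_tdc_pow : ∀ (k : Nat) (f : Nat) (l : List Char), 10 ^ k < f →
    Nat.toDigitsCore 10 f (10 ^ k) l = '1' :: (List.replicate k '0' ++ l) := by
  intro k
  induction k with
  | zero =>
    intro f l hf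
    match f with
    | 0 => omega
    | f' + 1 => simp [Nat.toDigitsCore, Nat.digitChar]
  | succ k ih =>
    intro f l hf
    match f with
    | 0 => exact absurd hf (not_lt.mpr (by positivity))
    | f' + 1 =>
      rw [Nat.toDigitsCore]
      have hdiv : 10 ^ (k + 1) / 10 = 10 ^ k := by
        rw [pow_succ, Nat.mul_div_cancel]; omega
      have hmod : 10 ^ (k + 1) % 10 = 0 := by
        rw [pow_succ]; omega
      have hne : 10 ^ (k + 1) / 10 ≠ 0 := by rw [hdiv]; positivity
      rw [if_neg hne, hmod, hdiv]
      have hpow : (10 : Nat) ^ k < f' := by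
        have h1 : (10 : Nat) ^ k < 10 ^ (k + 1) := Nat.pow_lt_pow_right (by omega) (by omega)
        omega
      rw [ih f' (Nat.digitChar 0 :: l) hpow]
      simp [Nat.digitChar, List.replicate_succ']

lemma pv_toChars_pow (k : Nat) :
    PySem.Int.toChars ((10 : Int) ^ k) = '1' :: List.replicate k '0' := by
  unfold PySem.Int.toChars
  rw [if_neg (not_lt.mpr (by positivity))]
  unfold Nat.toDigits
  have htoNat : ((10 : Int) ^ k).toNat = 10 ^ k := by
    rw [show ((10:Int)^k) = ((10^k : Nat) : Int) by push_cast; ring]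
    exact Int.toNat_natCast _
  rw [htoNat]
  simpa using pv_tdc_pow k (10 ^ k + 1) [] (by omega)

-- len(str n) = log₁₀ n + 1 as a Nat, for n ≥ 0
lemma pv_len_toStr (n : Int) (hn : 0 ≤ n) :
    (PySem.Str.len (PySem.Int.toStr n)).toNat = Nat.log 10 n.toNat + 1 := by
  rw [PySem.Str.len_eq, PySem.Int.toList_toStr, pv_toChars_len n hn]
  simp

-- on the nonnegative 32-bit domain, D_ says exactly 'c has more decimal digits than t'
lemma pv_D_iff (c t : Int) (hc : 0 ≤ c) (ht : 0 ≤ t) (hdom : c ≤ 2147483648) :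
    D_additionOfZeros c t ↔ Nat.log 10 t.toNat < Nat.log 10 c.toNat := by
  have hcC : c = (c.toNat : Int) := (Int.toNat_of_nonneg hc).symm
  have htT : t = (t.toNat : Int) := (Int.toNat_of_nonneg ht).symm
  constructor
  · rintro ⟨k, hk, hlt, hle⟩
    simp only [Finset.mem_Icc] at hk
    have hleN : 10 ^ k ≤ c.toNat := by
      have : ((10 ^ k : Nat) : Int) ≤ c := by push_cast; exact hle
      omega
    have hltN : t.toNat < 10 ^ k := by
      have : t < ((10 ^ k : Nat) : Int) := by push_cast; exact hlt
      omega
    have hcne : c.toNat ≠ 0 := by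
      have : (0:Nat) < 10 ^ k := by positivity
      omega
    have h1 : k ≤ Nat.log 10 c.toNat := (Nat.le_log_iff_pow_le (by omega) hcne).mpr hleN
    by_cases htz : t.toNat = 0
    · rw [htz]; simp only [Nat.log_zero_right]; omega
    · have h2 : Nat.log 10 t.toNat < k := (Nat.log_lt_iff_lt_pow (by omega) htz).mpr hltN
      omega
  · intro h
    have hcne : c.toNat ≠ 0 := by
      intro h0; rw [h0] at h; simp at h
    refine ⟨Nat.log 10 c.toNat, ?_, ?_, ?_⟩
    · simp only [Finset.mem_Icc]
      constructor
      · omega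
      · have hlt10 : c.toNat < 10 ^ 10 := by omega
        have := Nat.log_lt_of_lt_pow hcne hlt10
        omega
    · by_cases htz : t.toNat = 0
      · have hpos : (0:Nat) < 10 ^ Nat.log 10 c.toNat := by positivity
        have hcast : ((10 ^ Nat.log 10 c.toNat : Nat) : Int) = (10:Int) ^ Nat.log 10 c.toNat := by
          push_cast; ring
        omega
      · have : t.toNat < 10 ^ Nat.log 10 c.toNat :=
          (Nat.log_lt_iff_lt_pow (by omega) htz).mp h
        have : t < ((10 ^ Nat.log 10 c.toNat : Nat) : Int) := by omega
        push_cast at this; exact this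
    · have : 10 ^ Nat.log 10 c.toNat ≤ c.toNat := Nat.pow_log_le_self 10 hcne
      have : ((10 ^ Nat.log 10 c.toNat : Nat) : Int) ≤ c := by omega
      push_cast at this; exact this

-- stripping '1's off "1" ++ "0"*k leaves "0"*k
lemma pv_strip_pow (k : Nat) :
    PySem.Chars.stripChars ('1' :: List.replicate k '0') ['1'] = List.replicate k '0' := by
  unfold PySem.Chars.stripChars
  have hdw : List.dropWhile (fun c => (['1'].contains c)) (List.replicate k '0')
      = List.replicate k '0' := by
    cases k with
    | zero => simp
    | succ k => simp [List.replicate_succ]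
  simp only [List.dropWhile_cons]
  simp only [show (['1'].contains '1') = true by decide, if_pos]
  rw [hdw, List.reverse_replicate, hdw, List.reverse_replicate]

-- ===== VERDICT (by name: the statement is the Claim_ definition above) =====
theorem additionOfZeros_spec : Claim_unchanged_additionOfZeros := by
  intro c t hdom hpre hnd
  unfold additionOfZeros additionOfZeros_alt
  simp only
  rw [pv_size_eq_pow_len c hpre.1, pv_size_eq_pow_len t hpre.2]
  set Lc : Nat := (PySem.Str.len (PySem.Int.toStr c)).toNat with hLc
  set Lt : Nat := (PySem.Str.len (PySem.Int.toStr t)).toNat with hLt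
  have hlenc : PySem.Str.len (PySem.Int.toStr c) = (Lc : Int) := by
    rw [hLc, Int.toNat_of_nonneg (by rw [PySem.Str.len_eq]; positivity)]
  have hlent : PySem.Str.len (PySem.Int.toStr t) = (Lt : Int) := by
    rw [hLt, Int.toNat_of_nonneg (by rw [PySem.Str.len_eq]; positivity)]
  have hle : Lc ≤ Lt := by
    have hdc : c ≤ 2147483648 := by
      have := hdom; unfold Dom_additionOfZeros pvDomInt at this
      simp only [Bool.and_eq_true, decide_eq_true_eq] at this
      exact this.1.2
    have hlog : ¬ (Nat.log 10 t.toNat < Nat.log 10 c.toNat) := fun hh =>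
      hnd ((pv_D_iff c t hpre.1 hpre.2 hdc).mpr hh)
    rw [hLc, hLt, pv_len_toStr c hpre.1, pv_len_toStr t hpre.2]
    omega
  have hfd : PySem.Int.floordiv ((10:Int) ^ Lt) ((10:Int) ^ Lc) = (10 : Int) ^ (Lt - Lc) := by
    rw [show ((10:Int)^Lt) = ((10^Lt : Nat) : Int) by push_cast; ring,
        show ((10:Int)^Lc) = ((10^Lc : Nat) : Int) by push_cast; ring,
        PySem.Int.floordiv_natCast, Nat.pow_div hle (by omega)]
    push_cast; ring
  rw [hfd]
  rw [hlenc, hlent]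
  have hrep : PySem.List.pyRepeat ['0'] ((Lt : Int) - (Lc : Int))
      = List.replicate (Lt - Lc) '0' := by
    rw [PySem.List.pyRepeat_singleton]
    congr 1
    omega
  rw [hrep]
  unfold PySem.Str.stripChars
  rw [show (PySem.Int.toStr ((10:Int) ^ (Lt - Lc))).toList = PySem.Int.toChars ((10:Int) ^ (Lt - Lc)) from PySem.Int.toList_toStr _]
  rw [pv_toChars_pow (Lt - Lc)]
  rw [show ("1" : String).toList = ['1'] by decide]
  rw [pv_strip_pow]

theorem additionOfZeros_changed : Claim_changed_additionOfZeros := by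
  unfold Claim_changed_additionOfZeros; decide

theorem additionOfZeros_tight : Claim_exact_additionOfZeros := by
  intro c t hdom hpre hd
  unfold additionOfZeros additionOfZeros_alt
  simp only
  rw [pv_size_eq_pow_len c hpre.1, pv_size_eq_pow_len t hpre.2]
  set Lc : Nat := (PySem.Str.len (PySem.Int.toStr c)).toNat with hLc
  set Lt : Nat := (PySem.Str.len (PySem.Int.toStr t)).toNat with hLt
  have hlenc : PySem.Str.len (PySem.Int.toStr c) = (Lc : Int) := by
    rw [hLc, Int.toNat_of_nonneg (by rw [PySem.Str.len_eq]; positivity)]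
  have hlent : PySem.Str.len (PySem.Int.toStr t) = (Lt : Int) := by
    rw [hLt, Int.toNat_of_nonneg (by rw [PySem.Str.len_eq]; positivity)]
  have hlt : Lt < Lc := by
    have hdc : c ≤ 2147483648 := by
      have := hdom; unfold Dom_additionOfZeros pvDomInt at this
      simp only [Bool.and_eq_true, decide_eq_true_eq] at this
      exact this.1.2
    have hlog : Nat.log 10 t.toNat < Nat.log 10 c.toNat :=
      (pv_D_iff c t hpre.1 hpre.2 hdc).mp hd
    rw [hLc, hLt, pv_len_toStr c hpre.1, pv_len_toStr t hpre.2]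
    omega
  have hfd : PySem.Int.floordiv ((10:Int) ^ Lt) ((10:Int) ^ Lc) = 0 := by
    rw [show ((10:Int)^Lt) = ((10^Lt : Nat) : Int) by push_cast; ring,
        show ((10:Int)^Lc) = ((10^Lc : Nat) : Int) by push_cast; ring,
        PySem.Int.floordiv_natCast]
    have : (10:Nat)^Lt / 10^Lc = 0 :=
      Nat.div_eq_of_lt (Nat.pow_lt_pow_right (by omega) hlt)
    rw [this]; rfl
  rw [hfd, hlenc, hlent]
  have hrep : PySem.List.pyRepeat ['0'] ((Lt : Int) - (Lc : Int)) = [] := by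
    rw [PySem.List.pyRepeat_singleton]
    have : ((Lt : Int) - (Lc : Int)).toNat = 0 := by omega
    rw [this]; rfl
  rw [hrep]
  decide
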